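-- pv_equiv track=rewrite | github.com/marcogoedert/pucrs-ss-a1-vigenere | src/vigenere.py | distribute_cypher_by_key_length
-- ===== SOURCE A (Python) =====
-- def distribute_cypher_by_key_length(selectedCypher, key_length):
--     sub_array = []
--     # Create an array of arrays, each one with a length equal to its key length
--     for i in range(1, key_length + 1):
--         sub_array.append(
--             list(
--                 map(lambda x: [], range(i))
--             )
--         )
--
--     # Distribute the letters of the ciphered text into the subarrays
--     for i in range(len(selectedCypher)):
--         for j in range(key_length):
--             position = i % (j + 1)
--             sub_array[j][position].append(selectedCypher[i])
--
--     return sub_array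
-- ===== SOURCE B (Python) =====
-- def distribute_cypher_by_key_length(selectedCypher, key_length):
--     n = len(selectedCypher)
--     return [
--         [[selectedCypher[i] for i in range(p, n, m)] for p in range(m)]
--         for m in range(1, key_length + 1)
--     ]
-- ===== Notes on version B (the rewrite author's own statement) =====
-- stated objective: simpler
-- what changed: Instead of allocating all buckets and scattering each letter into every sub-array via i % (j+1), B gathers each bucket directly in one strided comprehension range(p, n, m), building the whole result as a nested comprehension.
import Mathlib
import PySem

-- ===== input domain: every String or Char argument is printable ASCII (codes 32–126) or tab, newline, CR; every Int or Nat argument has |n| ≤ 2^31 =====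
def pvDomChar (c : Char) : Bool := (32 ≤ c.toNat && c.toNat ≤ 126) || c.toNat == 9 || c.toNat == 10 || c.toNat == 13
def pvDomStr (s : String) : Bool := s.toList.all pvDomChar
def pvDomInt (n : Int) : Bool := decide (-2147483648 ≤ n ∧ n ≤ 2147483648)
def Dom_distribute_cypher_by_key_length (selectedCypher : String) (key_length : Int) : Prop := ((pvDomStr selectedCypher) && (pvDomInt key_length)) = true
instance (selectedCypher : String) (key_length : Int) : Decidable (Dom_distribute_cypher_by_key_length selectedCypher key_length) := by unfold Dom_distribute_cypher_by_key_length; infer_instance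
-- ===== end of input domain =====

-- B gathers each bucket with one strided range(p, n, m) comprehension instead of scattering
-- every letter into every sub-array by i % (j+1); simpler decomposition, same result.


-- ===== PORT A =====
-- Literal port of A: build sub_array (for each i in range(1, key_length+1) a list of i empty
-- buckets), then for each i in range(len(selectedCypher)) and j in range(key_length) append
-- selectedCypher[i] to sub_array[j][i % (j+1)].  range(key_length) is List.range key_length.toNat
-- (empty when key_length ≤ 0, as in Python); i % (j+1) is Nat mod = Python % on nonnegatives;
-- selectedCypher[i] with 0 ≤ i < len is exactly the one-char string String.ofList [chars[i]!].
def distribute_cypher_by_key_length (selectedCypher : String) (key_length : Int) : List (List (List String)) :=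
  let chars := selectedCypher.toList
  let sub_array :=
    (PySem.List.pyRange 1 (key_length + 1) 1).map
      (fun i => (List.range i.toNat).map (fun _ => ([] : List String)))
  (List.range chars.length).foldl
    (fun sub i =>
      (List.range key_length.toNat).foldl
        (fun s j => s.modify j (fun bucket =>
          bucket.modify (i % (j + 1)) (fun b => b ++ [String.ofList [chars[i]!]])))
        sub)
    sub_array

-- ===== PORT B =====
-- Literal port of B: [[[selectedCypher[i] for i in range(p, n, m)] for p in range(m)]
--                     for m in range(1, key_length + 1)];  selectedCypher[i] with i drawn from
-- range(p, n, m), 0 ≤ p ≤ i < n, is String.ofList [chars[i.toNat]!].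
def distribute_cypher_by_key_length_alt (selectedCypher : String) (key_length : Int) : List (List (List String)) :=
  let chars := selectedCypher.toList
  let n : Int := chars.length
  (PySem.List.pyRange 1 (key_length + 1) 1).map (fun m =>
    (PySem.List.pyRange 0 m 1).map (fun p =>
      (PySem.List.pyRange p n m).map (fun i => String.ofList [chars[i.toNat]!])))

-- ===== PRECONDITION & SPEC =====
def Spec_distribute_cypher_by_key_length (selectedCypher : String) (key_length : Int) (out : List (List (List String))) : Prop := out = distribute_cypher_by_key_length_alt selectedCypher key_length
instance (selectedCypher : String) (key_length : Int) (out : List (List (List String))) : Decidable (Spec_distribute_cypher_by_key_length selectedCypher key_length out) := by unfold Spec_distribute_cypher_by_key_length; infer_instance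

-- ===== CLAIM (what is proved, stated in full; the proofs are below) =====
def Claim_equal_distribute_cypher_by_key_length : Prop := ∀ (selectedCypher : String) (key_length : Int), Dom_distribute_cypher_by_key_length selectedCypher key_length → Spec_distribute_cypher_by_key_length selectedCypher key_length (distribute_cypher_by_key_length selectedCypher key_length)

-- ===== LEMMAS AND PROOFS =====

-- Count of indices i < n with i % m = p, in the closed form Python's range-length gives.
-- pvCnt m p n = length of range(p, n, m)
def pvCnt (m p n : Nat) : Nat := if p < n then (n - p + m - 1) / m else 0

lemma pvCnt_succ (m p n : Nat) (hm : 0 < m) (hp : p < m) :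
    pvCnt m p (n + 1) = pvCnt m p n + (if n % m = p then 1 else 0) := by
  unfold pvCnt
  rcases lt_trichotomy p n with h | h | h
  · have hpn1 : p < n + 1 := by omega
    rw [if_pos h, if_pos hpn1]
    have ht := Nat.div_add_mod n m
    set t := n / m with htdef
    by_cases hr : n % m = p
    · rw [hr] at ht
      have hdm : n + 1 - p + m - 1 = m * t + m := by omega
      have hdm2 : n - p + m - 1 = m * t + (m - 1) := by omega
      rw [if_pos hr, hdm, hdm2, Nat.mul_add_div hm, Nat.mul_add_div hm,
          Nat.div_self hm, Nat.div_eq_of_lt (by omega)]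
    · have hd := Nat.div_add_mod (n - p) m
      set u := (n - p) / m with hudef
      set v := (n - p) % m with hvdef
      have hvm : v < m := Nat.mod_lt _ hm
      have hv0 : v ≠ 0 := by
        intro h0
        have hnp : n = m * u + p := by omega
        have : n % m = p := by rw [hnp, Nat.mul_add_mod]; exact Nat.mod_eq_of_lt hp
        exact hr this
      have h1 : n + 1 - p + m - 1 = m * u + (v + m) := by omega
      have h2 : n - p + m - 1 = m * u + ((v - 1) + m) := by omega
      rw [if_neg hr, h1, h2, Nat.mul_add_div hm, Nat.mul_add_div hm,
          Nat.add_div_right _ hm, Nat.add_div_right _ hm,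
          Nat.div_eq_of_lt hvm, Nat.div_eq_of_lt (by omega)]
  · -- p = n : n < m so n % m = n = p
    subst h
    have : p % m = p := Nat.mod_eq_of_lt hp
    simp [this, Nat.div_self hm]
  · have h1 : ¬ p < n := by omega
    have h2 : ¬ p < n + 1 := by omega
    have h3 : n % m ≠ p := by have := Nat.mod_le n m; omega
    simp [h1, h2, h3]

lemma pvCnt_val (m p n : Nat) (hm : 0 < m) (hp : p < m) (hr : n % m = p) :
    p + m * pvCnt m p n = n := by
  unfold pvCnt
  have hpn : p ≤ n := by have := Nat.mod_le n m; omega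
  rcases eq_or_lt_of_le hpn with h | h
  · simp [show ¬ p < n by omega]; omega
  · rw [if_pos h]
    have ht := Nat.div_add_mod n m
    set t := n / m with htdef
    rw [hr] at ht
    have hdm : n - p + m - 1 = m * t + (m - 1) := by omega
    rw [hdm, Nat.mul_add_div hm, Nat.div_eq_of_lt (by omega), Nat.add_zero]
    omega

-- range(p, n, m) enumerates exactly the i < n with i % m = p (Nat level)
lemma pvRangeMapFilter {α : Type} (m p : Nat) (hm : 0 < m) (hp : p < m) (f : Nat → α) (n : Nat) :
    (List.range (pvCnt m p n)).map (fun k => f (p + m * k))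
      = ((List.range n).filter (fun i => i % m = p)).map f := by
  induction n with
  | zero => simp [pvCnt]
  | succ n ih =>
    rw [List.range_succ, List.filter_append, List.map_append, pvCnt_succ m p n hm hp]
    by_cases hr : n % m = p
    · rw [if_pos hr, List.range_succ, List.map_append, ih]
      simp [hr, pvCnt_val m p n hm hp hr]
    · simp [hr, ih]

-- the Int-level strided range, mapped through f ∘ toNat
lemma pvStrided {α : Type} (m p n : Nat) (hm : 0 < m) (hp : p < m) (f : Nat → α) :
    (PySem.List.pyRange (p : Int) (n : Int) (m : Int)).map (fun i => f i.toNat)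
      = ((List.range n).filter (fun i => i % m = p)).map f := by
  rw [PySem.List.pyRange_of_pos _ _ (by exact_mod_cast hm)]
  rw [← pvRangeMapFilter m p hm hp f n]
  have hcnt : (if (p : Int) < (n : Int) then (((n : Int) - p + m - 1) / m).toNat else 0) = pvCnt m p n := by
    unfold pvCnt
    by_cases h : p < n
    · rw [if_pos (by exact_mod_cast h), if_pos h]
      have : ((n : Int) - p + m - 1) = ((n - p + m - 1 : Nat) : Int) := by omega
      rw [this, ← Int.natCast_ediv, Int.toNat_natCast]
    · rw [if_neg (by exact_mod_cast h), if_neg h]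
  rw [hcnt, List.map_map]
  apply List.map_congr_left
  intro k _
  have hc : ((p : Int) + (m : Int) * (k : Int)) = ((p + m * k : Nat) : Int) := by push_cast; ring
  show f (((p : Int) + (m : Int) * (k : Int)).toNat) = f (p + m * k)
  rw [hc, Int.toNat_natCast]

-- folding modify over range K updates every position below K
lemma pvFoldlModify {α : Type} (F : Nat → α → α) (K : Nat) (l : List α) :
    (List.range K).foldl (fun s j => s.modify j (F j)) l
      = l.mapIdx (fun j a => if j < K then F j a else a) := by
  induction K with
  | zero =>
    apply List.ext_getElem (by simp)
    intro i h1 h2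
    simp [List.getElem_mapIdx]
  | succ K ih =>
    rw [List.range_succ, List.foldl_append, ih, List.foldl_cons, List.foldl_nil]
    apply List.ext_getElem (by simp)
    intro i h1 h2
    rw [List.getElem_modify]
    simp only [List.getElem_mapIdx]
    by_cases hK : K = i
    · subst hK; simp
    · simp only [if_neg hK]
      have hi : i < l.length := by simpa using h2
      by_cases h : i < K
      · simp [h, show i < K + 1 by omega]
      · simp [h, show ¬ i < K + 1 by omega]

lemma pvModifyMapRange {α : Type} (K : Nat) (h : Nat → α) (F : Nat → α → α) :
    (List.range K).foldl (fun s j => s.modify j (F j)) ((List.range K).map h)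
      = (List.range K).map (fun j => F j (h j)) := by
  rw [pvFoldlModify]
  apply List.ext_getElem (by simp)
  intro i h1 h2
  have hi : i < K := by simpa using h2
  simp [List.getElem_mapIdx, hi]

-- appending x to bucket q of a range-indexed list of buckets
lemma pvBucketStep (M q : Nat) (g : Nat → List String) (x : String) :
    ((List.range M).map g).modify q (fun b => b ++ [x])
      = (List.range M).map (fun p => g p ++ if q = p then [x] else []) := by
  apply List.ext_getElem (by simp)
  intro i h1 h2
  rw [List.getElem_modify]
  by_cases h : q = i <;> simp [h]

-- the loop invariant of A's distribution loop
lemma pvInv (chars : List Char) (K n : Nat) :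
    (List.range n).foldl
      (fun sub i =>
        (List.range K).foldl
          (fun s j => s.modify j (fun bucket =>
            bucket.modify (i % (j + 1)) (fun b => b ++ [String.ofList [chars[i]!]])))
          sub)
      ((List.range K).map (fun j => (List.range (j + 1)).map (fun _ => ([] : List String))))
    = (List.range K).map (fun j => (List.range (j + 1)).map (fun p =>
        ((List.range n).filter (fun i => i % (j + 1) = p)).map (fun i => String.ofList [chars[i]!]))) := by
  induction n with
  | zero => simp
  | succ n ih =>
    rw [List.range_succ, List.foldl_append, ih, List.foldl_cons, List.foldl_nil]
    rw [pvModifyMapRange K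
      (fun j => (List.range (j + 1)).map (fun p =>
        ((List.range n).filter (fun i => i % (j + 1) = p)).map (fun i => String.ofList [chars[i]!])))
      (fun j bucket => bucket.modify (n % (j + 1)) (fun b => b ++ [String.ofList [chars[n]!]]))]
    apply List.map_congr_left
    intro j _
    rw [pvBucketStep (j + 1) (n % (j + 1)) _ (String.ofList [chars[n]!])]
    apply List.map_congr_left
    intro p _
    rw [List.filter_append, List.map_append]
    by_cases hr : n % (j + 1) = p <;> simp [hr]

-- ===== VERDICT (by name: the statement is the Claim_ definition above) =====
theorem distribute_cypher_by_key_length_spec : Claim_equal_distribute_cypher_by_key_length := by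
  intro s k _
  unfold Spec_distribute_cypher_by_key_length
  unfold distribute_cypher_by_key_length distribute_cypher_by_key_length_alt
  simp only []
  rw [PySem.List.pyRange_one 1 (k + 1)]
  have hk : (k + 1 - 1).toNat = k.toNat := by omega
  rw [hk, List.map_map, List.map_map]
  have hidx : ∀ t : Nat, ((1 : Int) + (t : Int)).toNat = t + 1 := by intro t; omega
  -- left side initial sub_array
  have hinit : (List.range k.toNat).map
      ((fun i => (List.range i.toNat).map (fun _ => ([] : List String))) ∘ (fun t : Nat => (1 : Int) + t))
      = (List.range k.toNat).map (fun j => (List.range (j + 1)).map (fun _ => ([] : List String))) := by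
    apply List.map_congr_left; intro t _; simp [Function.comp, hidx t]
  rw [hinit, pvInv s.toList k.toNat s.toList.length]
  apply List.map_congr_left
  intro j _
  simp only [Function.comp_apply]
  have h1 : ((1 : Int) + (j : Int)) = ((j + 1 : Nat) : Int) := by push_cast; ring
  rw [h1, PySem.List.pyRange_one 0 ((j + 1 : Nat) : Int)]
  have h2 : (((j + 1 : Nat) : Int) - 0).toNat = j + 1 := by omega
  rw [h2, List.map_map]
  apply List.map_congr_left
  intro p hp
  have hp' : p < j + 1 := List.mem_range.mp hp
  simp only [Function.comp_apply, zero_add]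
  exact (pvStrided (j + 1) p s.toList.length (by omega) hp'
    (fun i => String.ofList [s.toList[i]!])).symm
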